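-- pv_equiv track=rewrite | github.com/mujeebhussain98/CP_problems | 06-leastfrequentletters-Python/leastfrequentletters.py | leastfrequentletters
-- ===== SOURCE A (Python) =====
-- from collections import Counter
--
-- def leastfrequentletters(s):
-- 	# Your code goes here
-- 	s=s.lower()
-- 	k=""
-- 	for i in s:
-- 		if(i.isalpha()):
-- 			k+=i
-- 	count = Counter(k)
-- 	fin_list=[i for i,j in count.items() if(j==1)]
-- 	return("".join(sorted(fin_list)))
-- ===== SOURCE B (Python) =====
-- from itertools import groupby
--
-- def leastfrequentletters(s):
--     s = s.lower()
--     filtered = [c for c in s if c.isalpha()]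
--     return "".join(k for k, g in groupby(sorted(filtered)) if len(list(g)) == 1)
-- ===== Notes on version B (the rewrite author's own statement) =====
-- stated objective: idiomatic
-- what changed: Replaces the Counter hash-count plus final sort of unique letters with sort-then-groupby: the filtered letters are sorted once and consecutive runs of length exactly 1 are emitted directly in order, so no Counter and no second sort are needed.
import Mathlib
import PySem

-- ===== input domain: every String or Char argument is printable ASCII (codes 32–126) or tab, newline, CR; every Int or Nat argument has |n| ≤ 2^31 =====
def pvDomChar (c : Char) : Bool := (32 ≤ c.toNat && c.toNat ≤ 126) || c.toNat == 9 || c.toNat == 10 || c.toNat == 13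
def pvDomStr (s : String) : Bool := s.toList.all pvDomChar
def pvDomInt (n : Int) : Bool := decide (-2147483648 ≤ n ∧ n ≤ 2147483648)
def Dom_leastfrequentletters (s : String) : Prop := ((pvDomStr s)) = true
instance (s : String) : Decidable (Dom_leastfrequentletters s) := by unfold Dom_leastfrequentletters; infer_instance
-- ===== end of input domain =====

-- B replaces Counter-then-sort by sort-then-groupby (emit keys of runs of length 1); same return value.

-- ===== PORT A =====
def leastfrequentletters (s : String) : String :=
  let sl := PySem.Str.lower s
  let k := sl.toList.foldl (fun acc i => if PySem.Chars.isalpha i then acc ++ [i] else acc) []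
  let count := PySem.Dict.counter k
  let finList := (count.items.filter (fun p => p.2 == (1 : Int))).map Prod.fst
  String.mk (PySem.List.sorted finList (fun x => x) false)

-- ===== PORT B =====
-- helper: itertools.groupby on a sorted char list, each group materialized as (key, run length)
def pvRuns : List Char → List (Char × Nat)
  | [] => []
  | c :: rest =>
    match pvRuns rest with
    | [] => [(c, 1)]
    | (d, n) :: t => if c = d then (d, n + 1) :: t else (c, 1) :: (d, n) :: t

def leastfrequentletters_alt (s : String) : String :=
  let sl := PySem.Str.lower s
  let filtered := sl.toList.filter PySem.Chars.isalpha
  String.mk (((pvRuns (PySem.List.sorted filtered (fun x => x) false)).filter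
      (fun p => p.2 == 1)).map Prod.fst)

-- ===== PRECONDITION & SPEC =====
def Spec_leastfrequentletters (s : String) (out : String) : Prop := out = leastfrequentletters_alt s
instance (s : String) (out : String) : Decidable (Spec_leastfrequentletters s out) := by unfold Spec_leastfrequentletters; infer_instance

-- ===== CLAIM (what is proved, stated in full; the proofs are below) =====
def Claim_equal_leastfrequentletters : Prop := ∀ (s : String), Dom_leastfrequentletters s → Spec_leastfrequentletters s (leastfrequentletters s)

-- ===== LEMMAS AND PROOFS =====

lemma pvRuns_nil_iff (ys : List Char) : pvRuns ys = [] ↔ ys = [] := by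
  cases ys with
  | nil => simp [pvRuns]
  | cons c rest =>
    simp only [pvRuns]
    cases pvRuns rest with
    | nil => simp
    | cons p t =>
      obtain ⟨d, n⟩ := p
      by_cases h : c = d <;> simp [h]

lemma pvRuns_head (c : Char) (rest : List Char) :
    ∃ n t, pvRuns (c :: rest) = (c, n) :: t := by
  simp only [pvRuns]
  cases h : pvRuns rest with
  | nil => exact ⟨1, [], rfl⟩
  | cons p t =>
    obtain ⟨d, n⟩ := p
    by_cases hc : c = d
    · exact ⟨n + 1, t, by simp [hc]⟩
    · exact ⟨1, (d, n) :: t, by simp [hc]⟩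

lemma pvRuns_cons (c : Char) (rest : List Char) :
    pvRuns (c :: rest) = match pvRuns rest with
      | [] => [(c, 1)]
      | (d, n) :: t => if c = d then (d, n + 1) :: t else (c, 1) :: (d, n) :: t := rfl

lemma pvRuns_mem (ys : List Char) (c : Char) :
    c ∈ (pvRuns ys).map Prod.fst ↔ c ∈ ys := by
  induction ys with
  | nil => simp [pvRuns]
  | cons a rest ih =>
    rw [pvRuns_cons]
    cases h : pvRuns rest with
    | nil =>
      have : rest = [] := (pvRuns_nil_iff rest).mp h
      subst this
      simp
    | cons p t =>
      obtain ⟨d, n⟩ := p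
      rw [h] at ih
      by_cases hcd : a = d
      · subst hcd
        simp at ih ⊢
        tauto
      · simp [hcd] at ih ⊢
        tauto

-- on a sorted list: run keys are strictly increasing and each run length is the key's multiplicity
lemma pvRuns_sorted_spec (ys : List Char) (hs : ys.Pairwise (· ≤ ·)) :
    ((pvRuns ys).map Prod.fst).Pairwise (· < ·) ∧
    ∀ p ∈ pvRuns ys, ys.count p.1 = p.2 := by
  induction ys with
  | nil => simp [pvRuns]
  | cons a rest ih =>
    have hle : ∀ x ∈ rest, a ≤ x := (List.pairwise_cons.mp hs).1
    have hrest : rest.Pairwise (· ≤ ·) := (List.pairwise_cons.mp hs).2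
    obtain ⟨ihk, ihc⟩ := ih hrest
    cases h : pvRuns rest with
    | nil =>
      have : rest = [] := (pvRuns_nil_iff rest).mp h
      subst this
      constructor
      · simp [pvRuns]
      · intro p hp
        simp [pvRuns] at hp
        subst hp
        simp
    | cons q t =>
      obtain ⟨d, n⟩ := q
      obtain ⟨b, rest', rfl⟩ : ∃ b rest', rest = b :: rest' := by
        cases rest with
        | nil => simp [pvRuns] at h
        | cons b r => exact ⟨b, r, rfl⟩
      obtain ⟨n', t', hh⟩ := pvRuns_head b rest'
      have hbd : b = d := by
        rw [h] at hh
        exact ((Prod.mk.injEq _ _ _ _).mp (List.cons_eq_cons.mp hh).1).1.symm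
      subst hbd
      rw [h] at ihk ihc
      have ihk' : (b :: t.map Prod.fst).Pairwise (· < ·) := by simpa using ihk
      have hcount_d : (b :: rest').count b = n := by simpa using ihc (b, n) (by simp)
      have hkeys_t : ∀ p ∈ t, b < p.1 := by
        intro p hp
        exact (List.pairwise_cons.mp ihk').1 p.1 (List.mem_map.mpr ⟨p, hp, rfl⟩)
      by_cases hcd : a = b
      · subst hcd
        rw [pvRuns_cons, h]
        simp only [reduceIte]
        constructor
        · simpa using ihk'
        · intro p hp
          simp at hp
          rcases hp with hp | hp
          · subst hp
            simp only [List.count_cons_self, hcount_d]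
          · have hne : p.1 ≠ a := ne_of_gt (hkeys_t p hp)
            have h2 := ihc p (by simp [hp])
            rw [List.count_cons_of_ne hne.symm]
            exact h2
      · have hadb : a ≤ b := hle b (by simp)
        have halt : a < b := lt_of_le_of_ne hadb hcd
        have hnotmem : a ∉ b :: rest' := by
          intro hmem
          rcases List.mem_cons.mp hmem with h1 | h1
          · exact hcd h1
          · have : b ≤ a := (List.pairwise_cons.mp hrest).1 a h1
            exact hcd (le_antisymm hadb this)
        rw [pvRuns_cons, h]
        simp only [if_neg hcd]
        constructor
        · refine List.pairwise_cons.mpr ⟨?_, by simpa using ihk'⟩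
          intro x hx
          simp only [List.map_cons, List.mem_cons] at hx
          rcases hx with rfl | hx
          · exact halt
          · obtain ⟨p, hp, rfl⟩ := List.mem_map.mp hx
            exact lt_trans halt (hkeys_t p hp)
        · intro p hp
          simp at hp
          rcases hp with hp | hp | hp
          · subst hp
            simp [List.count_eq_zero.mpr hnotmem]
          · subst hp
            show List.count b (a :: b :: rest') = n
            rw [List.count_cons_of_ne hcd]
            exact hcount_d
          · have hne : p.1 ≠ a := ne_of_gt (lt_trans halt (hkeys_t p hp))
            rw [List.count_cons_of_ne hne.symm]
            exact ihc p (by simp [hp])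

-- ===== VERDICT (by name: the statement is the Claim_ definition above) =====
set_option maxHeartbeats 1000000 in
theorem leastfrequentletters_spec : Claim_equal_leastfrequentletters := by
  intro s _
  unfold Spec_leastfrequentletters leastfrequentletters leastfrequentletters_alt
  simp only [PySem.List.foldl_append_if_eq_filter, List.nil_append, PySem.Dict.items_counter]
  set f : List Char := (PySem.Str.lower s).toList.filter PySem.Chars.isalpha with hf
  set ys : List Char := PySem.List.sorted f (fun x => x) false with hys
  have hperm : ys.Perm f := PySem.List.sorted_perm f (fun x => x) false
  have hsorted : ys.Pairwise (· ≤ ·) := by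
    simpa using PySem.List.sorted_pairwise (xs := f) (key := fun x => x)
  obtain ⟨hkeys, hcnt⟩ := pvRuns_sorted_spec ys hsorted
  -- A's fin_list, simplified
  have hA : ((((PySem.Set.ofList f).map (fun k => (k, (f.count k : Int)))).filter
        (fun p => p.2 == (1 : Int))).map Prod.fst)
      = (PySem.Set.ofList f).filter (fun c => (f.count c : Int) == 1) := by
    rw [List.filter_map, List.map_map]
    simp [Function.comp_def]
  set finList : List Char := (PySem.Set.ofList f).filter (fun c => (f.count c : Int) == 1)
    with hfin
  -- B's output list
  set L : List Char := ((pvRuns ys).filter (fun p => p.2 == 1)).map Prod.fst with hL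
  -- L is pairwise < (sublist of the run keys)
  have hLsub : L.Sublist ((pvRuns ys).map Prod.fst) :=
    (List.filter_sublist (l := pvRuns ys) (p := fun p => p.2 == 1)).map Prod.fst
  have hLlt : L.Pairwise (· < ·) := hkeys.sublist hLsub
  -- memberships
  have hmemL : ∀ c, c ∈ L ↔ c ∈ f ∧ f.count c = 1 := by
    intro c
    constructor
    · intro hc
      obtain ⟨p, hp, rfl⟩ := List.mem_map.mp hc
      have hpin : p ∈ pvRuns ys := (List.mem_filter.mp hp).1
      have hp1 : p.2 = 1 := by simpa using (List.mem_filter.mp hp).2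
      have hmem : p.1 ∈ ys := (pvRuns_mem ys p.1).mp (List.mem_map.mpr ⟨p, hpin, rfl⟩)
      refine ⟨hperm.mem_iff.mp hmem, ?_⟩
      rw [← hperm.count_eq, hcnt p hpin, hp1]
    · rintro ⟨hcf, hc1⟩
      have hmem : c ∈ ys := hperm.mem_iff.mpr hcf
      obtain ⟨p, hpin, hp1⟩ := List.mem_map.mp ((pvRuns_mem ys c).mpr hmem)
      have : p.2 = 1 := by
        rw [← hcnt p hpin, hp1, hperm.count_eq, hc1]
      exact List.mem_map.mpr ⟨p, List.mem_filter.mpr ⟨hpin, by simpa using this⟩, hp1⟩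
  have hmemF : ∀ c, c ∈ finList ↔ c ∈ f ∧ f.count c = 1 := by
    intro c
    rw [hfin, List.mem_filter]
    constructor
    · rintro ⟨h1, h2⟩
      refine ⟨(PySem.Set.mem_ofList f c).mp h1, ?_⟩
      have : (f.count c : Int) = 1 := by simpa using h2
      exact_mod_cast this
    · rintro ⟨h1, h2⟩
      exact ⟨(PySem.Set.mem_ofList f c).mpr h1, by simp [h2]⟩
  -- nodup on both sides
  have hLnd : L.Nodup := hLlt.imp ne_of_lt
  have hFnd : finList.Nodup := (PySem.Set.nodup_ofList f).filter _
  have hperm2 : L.Perm finList := by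
    rw [List.perm_ext_iff_of_nodup hLnd hFnd]
    intro c
    rw [hmemL c, hmemF c]
  have hsortedEq : PySem.List.sorted finList (fun x => x) false = L :=
    PySem.List.sorted_eq_of_perm_of_pairwise_lt finList L (fun x => x) hperm2 (by simpa using hLlt)
  rw [hA, hsortedEq]
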